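-- pv_equiv track=rewrite | github.com/lyj238Gmail/server-dt5 | 备用test/py2/id3.py | priInEndClassify
-- ===== SOURCE A (Python) =====
-- def priInEndClassify(dataSet,labels,prior_dict):
-- 	resut_list = []
-- 	temp_labels = labels[:]
-- 	for i in range(len(temp_labels)):
-- 		temp_labels[i] = temp_labels[i].lower()
--
--
-- 	for member in prior_dict.keys():
-- 		if member in temp_labels: #存在未被使用的优先属性
-- 			position = temp_labels.index(member) #找到其位于title的位置
-- 			temp_list = [example[position] for example in dataSet] #找到数据集中该位置的所有取值
-- 			temp_set = set(temp_list) #去重复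
-- 			temp_set_list = list(temp_set)
-- 			if len(temp_set_list) == 1: #一致的取值，代表可以加入到叶子节点中
-- 				str_temp = member + ' = ' + temp_set_list[0]
-- 				resut_list.append(str_temp)
-- 			'''
-- 			else:
-- 				print member + ':'
-- 				print temp_set
-- 			'''
--
-- 	if len(resut_list) == 0:
-- 		return 'empty'
-- 	else:
-- 		result = ''
-- 		for member in resut_list:
-- 			if result == '':
-- 				result = member
-- 			else:
-- 				result = result + ' & ' + member
-- 		return ' & ' + result
-- ===== SOURCE B (Python) =====
-- def priInEndClassify(dataSet, labels, prior_dict):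
-- 	low = [l.lower() for l in labels]
-- 	# one pass over the data: distinct values per column index
-- 	col_values = {}
-- 	for row in dataSet:
-- 		for i, v in enumerate(row):
-- 			col_values.setdefault(i, set()).add(v)
-- 	parts = []
-- 	for member in prior_dict.keys():
-- 		if member in low:
-- 			vals = col_values.get(low.index(member), set())
-- 			if len(vals) == 1:
-- 				parts.append(member + ' = ' + next(iter(vals)))
-- 	if not parts:
-- 		return 'empty'
-- 	return ' & ' + ' & '.join(parts)
-- ===== Notes on version B (the rewrite author's own statement) =====
-- stated objective: alternative
-- what changed: B builds the distinct-values-per-column table in one pass over dataSet and joins the collected constraints with ' & '.join, instead of A's re-scanning the whole dataSet once per prior key and accumulating the result string manually.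
import Mathlib
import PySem

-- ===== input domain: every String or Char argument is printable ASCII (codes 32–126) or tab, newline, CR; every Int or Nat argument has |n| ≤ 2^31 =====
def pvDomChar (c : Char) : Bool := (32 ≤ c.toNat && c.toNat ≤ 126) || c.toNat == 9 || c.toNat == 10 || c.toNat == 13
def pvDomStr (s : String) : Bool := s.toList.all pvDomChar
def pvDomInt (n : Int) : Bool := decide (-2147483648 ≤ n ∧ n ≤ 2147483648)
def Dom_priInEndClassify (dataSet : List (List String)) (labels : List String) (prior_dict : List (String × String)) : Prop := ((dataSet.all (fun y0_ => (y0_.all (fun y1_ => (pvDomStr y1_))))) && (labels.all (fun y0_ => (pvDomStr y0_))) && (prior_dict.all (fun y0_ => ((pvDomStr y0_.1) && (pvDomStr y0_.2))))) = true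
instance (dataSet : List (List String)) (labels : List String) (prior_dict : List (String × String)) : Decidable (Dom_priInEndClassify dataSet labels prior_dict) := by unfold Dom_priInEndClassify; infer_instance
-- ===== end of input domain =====

-- ===== PORT A =====
-- B replaces A's per-key column rescan + manual string accumulation by a one-pass
-- column-value table + join (objective: alternative decomposition).
-- helper: A's in-place lowering loop 'for i in range(len(temp_labels)): temp_labels[i] = temp_labels[i].lower()'
def pvLowerStep (acc : List String) (i : Int) : List String :=
  PySem.List.pySetD acc i (PySem.Str.lower (PySem.List.pyGetD acc i ""))

-- helper: A's per-key loop body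
def pvStepA (dataSet : List (List String)) (temp_labels : List String)
    (res : List String) (member : String) : List String :=
  if temp_labels.contains member then
    let position := (PySem.List.index? temp_labels member).getD 0
    -- example[position]: Pre_ excludes the inputs on which Python raises IndexError here
    let temp_list := dataSet.map (fun ex => PySem.List.pyGetD ex (position : Int) "")
    let temp_set : PySem.Set String := PySem.Set.ofList temp_list
    -- list(temp_set)[0] is read only when the set has exactly one element, so it is order-independent
    if temp_set.length = 1 then res ++ [member ++ " = " ++ temp_set.headD ""] else res
  else res

def priInEndClassify (dataSet : List (List String)) (labels : List String) (prior_dict : List (String × String)) : String :=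
  let temp_labels := (PySem.List.pyRange 0 (labels.length : Int)).foldl pvLowerStep labels
  let resut_list := (PySem.Dict.ofList prior_dict).keys.foldl (pvStepA dataSet temp_labels) []
  if resut_list.length = 0 then "empty"
  else " & " ++ resut_list.foldl (fun result member =>
         if result = "" then member else result ++ " & " ++ member) ""

-- ===== PORT B =====
-- helper: B's inner loop 'for i, v in enumerate(row): col_values.setdefault(i, set()).add(v)'
def pvRowFold : Nat → List String → PySem.Dict Nat (PySem.Set String) → PySem.Dict Nat (PySem.Set String)
  | _, [], d => d
  | i, v :: vs, d => pvRowFold (i + 1) vs (d.insert i (PySem.Set.add (d.getD i PySem.Set.empty) v))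

-- helper: B's per-key loop body
def pvStepB (table : PySem.Dict Nat (PySem.Set String)) (low : List String)
    (acc : List String) (member : String) : List String :=
  if low.contains member then
    let vals := table.getD ((PySem.List.index? low member).getD 0) PySem.Set.empty
    -- next(iter(vals)) is read only when len(vals) == 1, so it is order-independent
    if vals.length = 1 then acc ++ [member ++ " = " ++ vals.headD ""] else acc
  else acc

def priInEndClassify_alt (dataSet : List (List String)) (labels : List String) (prior_dict : List (String × String)) : String :=
  let low := labels.map PySem.Str.lower
  let table := dataSet.foldl (fun d row => pvRowFold 0 row d) PySem.Dict.empty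
  let parts := (PySem.Dict.ofList prior_dict).keys.foldl (pvStepB table low) []
  if parts = [] then "empty" else " & " ++ PySem.Str.join " & " parts

-- ===== PRECONDITION & SPEC =====
-- Pre_ excludes exactly the inputs on which A raises IndexError: a prior key matching a
-- (lowercased) label whose column index falls outside some row of dataSet.
def Pre_priInEndClassify (dataSet : List (List String)) (labels : List String) (prior_dict : List (String × String)) : Prop :=
  ∀ p ∈ prior_dict, ∀ row ∈ dataSet,
    PySem.List.index? (labels.map PySem.Str.lower) p.1 = none ∨
    (PySem.List.index? (labels.map PySem.Str.lower) p.1).getD 0 < row.length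
instance (dataSet : List (List String)) (labels : List String) (prior_dict : List (String × String)) : Decidable (Pre_priInEndClassify dataSet labels prior_dict) := by unfold Pre_priInEndClassify; infer_instance

def pvWitness_priInEndClassify : List (List String) × List String × (List (String × String)) :=
  ([["x", "u"], ["x", "v"]], ["A", "B"], [("a", "p"), ("c", "q")])

def Spec_priInEndClassify (dataSet : List (List String)) (labels : List String) (prior_dict : List (String × String)) (out : String) : Prop := out = priInEndClassify_alt dataSet labels prior_dict
instance (dataSet : List (List String)) (labels : List String) (prior_dict : List (String × String)) (out : String) : Decidable (Spec_priInEndClassify dataSet labels prior_dict out) := by unfold Spec_priInEndClassify; infer_instance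

-- ===== CLAIM (what is proved, stated in full; the proofs are below) =====
def Claim_equal_priInEndClassify : Prop := ∀ (dataSet : List (List String)) (labels : List String) (prior_dict : List (String × String)), Dom_priInEndClassify dataSet labels prior_dict → Pre_priInEndClassify dataSet labels prior_dict → Spec_priInEndClassify dataSet labels prior_dict (priInEndClassify dataSet labels prior_dict)


-- ===== LEMMAS AND PROOFS =====

theorem pvTakeAux {α : Type} (t rest : List α) (x : α) (j : Nat) (ht : t.length = j) :
    (t ++ x :: rest).take (j+1) = t ++ [x] := by
  subst ht; simp [List.take_append]

theorem pvDropAux {α : Type} (t rest : List α) (x : α) (j : Nat) (ht : t.length = j) :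
    (t ++ x :: rest).drop (j+1) = rest := by
  subst ht; simp [List.drop_append]

-- A's index-assignment lowering loop is elementwise lowering.
theorem pvLowerAux (k : Nat) : ∀ (j : Nat) (acc : List String), acc.length = j + k →
    (PySem.List.pyRange (j : Int) ((j + k : Nat) : Int)).foldl pvLowerStep acc =
      acc.take j ++ (acc.drop j).map PySem.Str.lower := by
  induction k with
  | zero =>
    intro j acc h
    have h1 : PySem.List.pyRange (j : Int) ((j + 0 : Nat) : Int) = [] := by simp [pysem]
    have hd : acc.drop j = [] := List.drop_eq_nil_of_le (by omega)
    have ht : acc.take j = acc := List.take_of_length_le (by omega)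
    rw [h1, hd, ht]; simp
  | succ k ih =>
    intro j acc h
    have hj : j < acc.length := by omega
    have h1 : PySem.List.pyRange (j : Int) ((j + (k+1) : Nat) : Int) =
        (j : Int) :: PySem.List.pyRange ((j : Int) + 1) ((j + (k+1) : Nat) : Int) :=
      PySem.List.pyRange_one_cons (by push_cast; omega)
    rw [h1, List.foldl_cons]
    have hstep : pvLowerStep acc (j : Int) = acc.set j (PySem.Str.lower acc[j]) := by
      simp only [pvLowerStep, PySem.List.pySetD_natCast, PySem.List.pyGetD_natCast,
        List.getD_eq_getElem?_getD, List.getElem?_eq_getElem hj, Option.getD_some]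
    have hcast : ((j : Int) + 1) = ((j + 1 : Nat) : Int) := by push_cast; ring
    have hcast2 : ((j + (k+1) : Nat) : Int) = (((j+1) + k : Nat) : Int) := by push_cast; ring
    rw [hstep, hcast, hcast2, ih (j+1) _ (by simp; omega)]
    have hset : acc.set j (PySem.Str.lower acc[j]) =
        acc.take j ++ PySem.Str.lower acc[j] :: acc.drop (j+1) := by
      rw [List.set_eq_take_append_cons_drop]; simp [hj]
    have hlen : (acc.take j).length = j := by simp; omega
    rw [hset, pvTakeAux _ _ _ _ hlen, pvDropAux _ _ _ _ hlen]
    rw [show acc.drop j = acc[j] :: acc.drop (j+1) from (List.getElem_cons_drop hj).symm]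
    simp
    conv_rhs => rw [← List.getElem_cons_drop (show j < (acc.map PySem.Str.lower).length by simpa using hj)]
    simp

theorem pvLowerA (labels : List String) :
    (PySem.List.pyRange 0 (labels.length : Int)).foldl pvLowerStep labels = labels.map PySem.Str.lower := by
  have := pvLowerAux labels.length 0 labels (by simp)
  simpa using this

-- B's per-row table update, one column at a time.
theorem pvRowFold_getD (row : List String) : ∀ (j : Nat) (d : PySem.Dict Nat (PySem.Set String)) (i : Nat),
    (pvRowFold j row d).getD i PySem.Set.empty =
      if j ≤ i ∧ i - j < row.length then PySem.Set.add (d.getD i PySem.Set.empty) (row.getD (i - j) "")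
      else d.getD i PySem.Set.empty := by
  induction row with
  | nil =>
    intro j d i
    rw [show pvRowFold j [] d = d from rfl, if_neg (by simp)]
  | cons v vs ih =>
    intro j d i
    rw [show pvRowFold j (v :: vs) d
        = pvRowFold (j+1) vs (d.insert j (PySem.Set.add (d.getD j PySem.Set.empty) v)) from rfl]
    rw [ih]
    rcases eq_or_ne i j with rfl | hne
    · rw [if_neg (by omega), if_pos (by simp)]
      simp
    · simp only [PySem.Dict.getD_insert, if_neg hne]
      split_ifs with h1 h2 h2
      · have he : i - j = (i - (j+1)) + 1 := by omega
        rw [he, List.getD_cons_succ]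
      · simp at h2; omega
      · simp at h2; omega
      · rfl

theorem pvTable_getD (rows : List (List String)) : ∀ (d : PySem.Dict Nat (PySem.Set String)) (i : Nat),
    (rows.foldl (fun d row => pvRowFold 0 row d) d).getD i PySem.Set.empty =
      rows.foldl (fun s row => if i < row.length then PySem.Set.add s (row.getD i "") else s)
        (d.getD i PySem.Set.empty) := by
  induction rows with
  | nil => intro d i; rfl
  | cons row rows ih =>
    intro d i
    rw [List.foldl_cons, List.foldl_cons, ih, pvRowFold_getD]
    congr 1
    simp

-- under the in-range hypothesis the table's column i is exactly set() of that column
theorem pvTable_col (rows : List (List String)) (i : Nat) (h : ∀ row ∈ rows, i < row.length) :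
    (rows.foldl (fun d row => pvRowFold 0 row d) PySem.Dict.empty).getD i PySem.Set.empty =
      PySem.Set.ofList (rows.map (fun row => row.getD i "")) := by
  rw [pvTable_getD, PySem.Dict.getD_empty]
  rw [← PySem.Set.update_empty, PySem.Set.update_map_eq_foldl_add]
  exact PySem.List.foldl_congr_mem _ _ _ _ (fun acc x hx => by rw [if_pos (h x hx)])

theorem pvJoinChars (sep a b : List Char) (rest : List (List Char)) :
    PySem.Chars.join sep ((a ++ sep ++ b) :: rest) = a ++ sep ++ PySem.Chars.join sep (b :: rest) := by
  cases rest with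
  | nil => rw [PySem.Chars.join_singleton, PySem.Chars.join_singleton]
  | cons x xs =>
    rw [PySem.Chars.join_cons_cons, PySem.Chars.join_cons_cons]
    simp [List.append_assoc]

-- A's manual ' & ' accumulation is ' & '.join.
theorem pvJoinAux (L : List String) : ∀ (r : String), r ≠ "" →
    L.foldl (fun result member => if result = "" then member else result ++ " & " ++ member) r =
      PySem.Str.join " & " (r :: L) := by
  induction L with
  | nil =>
    intro r _
    refine (String.toList_inj.mp ?_).symm
    rw [PySem.Str.toList_join]
    simp [PySem.Chars.join_singleton]
  | cons m L ih =>
    intro r hr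
    rw [List.foldl_cons, if_neg hr]
    have hr' : r ++ " & " ++ m ≠ "" := by
      intro hc
      have := congrArg String.toList hc
      simp [String.toList_append] at this
    rw [ih _ hr']
    refine String.toList_inj.mp ?_
    rw [PySem.Str.toList_join, PySem.Str.toList_join]
    simp only [List.map_cons, String.toList_append]
    rw [pvJoinChars, PySem.Chars.join_cons_cons]

theorem pvJoin (L : List String) (hne : L ≠ []) (h : ∀ s ∈ L, s ≠ "") :
    L.foldl (fun result member => if result = "" then member else result ++ " & " ++ member) "" =
      PySem.Str.join " & " L := by
  cases L with
  | nil => exact absurd rfl hne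
  | cons m L =>
    rw [List.foldl_cons, if_pos rfl]
    exact pvJoinAux L m (h m (by simp))

-- every string the per-key loops collect has the shape b ++ " = " ++ c (hence is nonempty)
theorem pvFold_shape (g : List String → String → List String)
    (hg : ∀ a x, g a x = a ∨ ∃ b c, g a x = a ++ [b ++ " = " ++ c]) :
    ∀ (K acc : List String), ∀ s ∈ K.foldl g acc, s ∈ acc ∨ ∃ b c, s = b ++ " = " ++ c := by
  intro K
  induction K with
  | nil => intro acc s hs; exact Or.inl hs
  | cons x xs ih =>
    intro acc s hs
    rw [List.foldl_cons] at hs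
    rcases ih (g acc x) s hs with h | h
    · rcases hg acc x with he | ⟨b, c, he⟩
      · rw [he] at h; exact Or.inl h
      · rw [he] at h
        rcases List.mem_append.mp h with h' | h'
        · exact Or.inl h'
        · exact Or.inr ⟨b, c, by simpa using h'⟩
    · exact Or.inr h

theorem pvKeys (prior_dict : List (String × String)) :
    (PySem.Dict.ofList prior_dict).keys = PySem.Set.ofList (prior_dict.map Prod.fst) := by
  rw [show PySem.Dict.ofList prior_dict
      = List.foldl (fun acc p => acc.insert p.1 p.2) PySem.Dict.empty prior_dict from rfl]
  rw [PySem.Dict.keys_foldl_insert_key prior_dict Prod.fst (fun _ p => p.2)]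
  rw [PySem.Dict.keys_empty]
  exact PySem.Set.update_empty _

-- the two per-key loop bodies agree on any key whose matched column is in range of every row
theorem pvStep_eq (dataSet : List (List String)) (low : List String) (x : String)
    (hbound : ∀ pos, PySem.List.index? low x = some pos → ∀ row ∈ dataSet, pos < row.length)
    (acc : List String) :
    pvStepA dataSet low acc x
      = pvStepB (dataSet.foldl (fun d row => pvRowFold 0 row d) PySem.Dict.empty) low acc x := by
  simp only [pvStepA, pvStepB]
  by_cases hc : low.contains x
  · have hmem : x ∈ low := by simpa using hc
    cases hidx : PySem.List.index? low x with
    | none =>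
      have := (PySem.List.index?_isSome_iff low x).mpr hmem
      rw [hidx] at this; simp at this
    | some pos =>
      have hval : (dataSet.foldl (fun d row => pvRowFold 0 row d) PySem.Dict.empty).getD pos PySem.Set.empty
          = PySem.Set.ofList (dataSet.map (fun row => row.getD (pos : Nat) "")) :=
        pvTable_col dataSet pos (hbound pos hidx)
      rw [if_pos hc, if_pos hc]
      simp only [Option.getD_some, PySem.List.pyGetD_natCast, hval]
  · rw [if_neg hc, if_neg hc]

theorem pvShapeB (table : PySem.Dict Nat (PySem.Set String)) (low : List String) :
    ∀ a x, pvStepB table low a x = a ∨ ∃ b c, pvStepB table low a x = a ++ [b ++ " = " ++ c] := by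
  intro a x
  simp only [pvStepB]
  by_cases h1 : low.contains x
  · rw [if_pos h1]
    by_cases h2 : (table.getD ((PySem.List.index? low x).getD 0) PySem.Set.empty).length = 1
    · rw [if_pos h2]
      exact Or.inr ⟨x, _, rfl⟩
    · rw [if_neg h2]
      exact Or.inl rfl
  · rw [if_neg h1]
    exact Or.inl rfl

-- ===== VERDICT (by name: the statement is the Claim_ definition above) =====
theorem priInEndClassify_spec : Claim_equal_priInEndClassify := by
  intro dataSet labels prior_dict _hDom hPre
  unfold Spec_priInEndClassify
  simp only [priInEndClassify, priInEndClassify_alt]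
  rw [pvLowerA]
  have hL : (PySem.Dict.ofList prior_dict).keys.foldl (pvStepA dataSet (labels.map PySem.Str.lower)) []
      = (PySem.Dict.ofList prior_dict).keys.foldl
          (pvStepB (dataSet.foldl (fun d row => pvRowFold 0 row d) PySem.Dict.empty)
            (labels.map PySem.Str.lower)) [] := by
    refine PySem.List.foldl_congr_mem _ _ _ _ (fun acc x hx => ?_)
    refine pvStep_eq dataSet (labels.map PySem.Str.lower) x (fun pos hidx row hrow => ?_) acc
    rw [pvKeys] at hx
    have hx' : x ∈ prior_dict.map Prod.fst := (PySem.Set.mem_ofList _ _).mp hx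
    obtain ⟨p, hp, hpx⟩ := List.mem_map.mp hx'
    rcases hPre p hp row hrow with hnone | hlt
    · rw [hpx, hidx] at hnone; cases hnone
    · rw [hpx, hidx] at hlt; simpa using hlt
  rw [hL]
  have hne : ∀ s ∈ (PySem.Dict.ofList prior_dict).keys.foldl
      (pvStepB (dataSet.foldl (fun d row => pvRowFold 0 row d) PySem.Dict.empty)
        (labels.map PySem.Str.lower)) [], s ≠ "" := by
    intro s hs
    rcases pvFold_shape _ (pvShapeB _ _) _ [] s hs with h | ⟨b, c, rfl⟩
    · cases h
    · intro hc
      have := congrArg String.toList hc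
      simp [String.toList_append] at this
  clear hL
  generalize hG : (PySem.Dict.ofList prior_dict).keys.foldl
      (pvStepB (dataSet.foldl (fun d row => pvRowFold 0 row d) PySem.Dict.empty)
        (labels.map PySem.Str.lower)) [] = L at hne ⊢
  cases L with
  | nil => simp
  | cons m rest =>
    rw [if_neg (by simp), if_neg (by simp)]
    rw [pvJoin (m :: rest) (by simp) hne]
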